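-- pv_equiv track=rewrite | github.com/strahinjastevanovic/ETL_HemOnc_regimens | src/tools/sre_tools.py | collapse_event_matrix_wrapper
-- ===== SOURCE A (Python) =====
-- from collections import defaultdict
--
-- def collapse_event_matrix(event_string):
--     components = sorted(event_string.keys())
--     num_days = len(next(iter(event_string.values())))
--
--     for k, v in event_string.items():
--         if len(v) != num_days:
--             raise ValueError(f"Component '{k}' has mismatched length.")
--
--     # Create a unified event matrix of 1s where any drug is active
--     unified_events = [0] * num_days
--     for v in event_string.values():
--         for i, val in enumerate(v):
--             if val == 1:
--                 unified_events[i] = 1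
--
--     # Precompute all event days
--     event_days = [i for i, val in enumerate(unified_events) if val == 1]
--
--     tag_entries = []
--     for day in event_days:
--         active_names = sorted([comp for comp in components if event_string[comp][day] == 1])
--         if active_names:
--             tag_entries.append((day, active_names))
--
--     if not tag_entries:
--         return ""
--
--     last_day = tag_entries[-1][0]
--     shift = num_days - last_day  # Same logic as before
--
--     output = []
--     used_shift = False
--     event_index = 0
--     component_first_use = set()
--
--     for day, names in tag_entries:
--         main = names[0]
--
--         if not used_shift:
--             tag = f"{shift}.{main}"
--             used_shift = True
--         else:
--             delta = event_days[event_index] - event_days[event_index - 1]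
--             tag = f"{delta}.{main}"
--
--         output.append(tag)
--         component_first_use.add(main)
--
--         for name in names[1:]:
--             tag = f"0.{name}"
--             output.append(tag)
--             component_first_use.add(name)
--
--         event_index += 1
--
--     if len(component_first_use) == 1:
--         return ";".join(output + output)
--
--     return ";".join(output)
--
-- def collapse_event_matrix_wrapper(event_string):
--     # Remove zero-only components
--     filtered = {k: v for k, v in event_string.items() if any(val != 0 for val in v)}
--     if not filtered:
--         return [""], {}
--
--     results = []
--     tracker = {}
--
--     # Group components by exact sequence length
--     length_groups = defaultdict(dict)
--     for k, v in filtered.items():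
--         length_groups[len(v)][k] = v
--
--     # Run collapse_event_matrix on each length group
--     for length, group in length_groups.items():
--         result = collapse_event_matrix(group)
--         results.append(result)
--         tracker[f"len_{length}"] = len(group)
--
--     return results, tracker
-- ===== SOURCE B (Python) =====
-- from collections import defaultdict
--
-- def _collapse(group, num_days):
--     # one pass: invert the matrix into day -> sorted active component names
--     day_to_names = defaultdict(list)
--     for comp in sorted(group):
--         for day, val in enumerate(group[comp]):
--             if val == 1:
--                 day_to_names[day].append(comp)
--
--     event_days = sorted(day_to_names)
--     if not event_days:
--         return ""
--
--     shift = num_days - event_days[-1]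
--     output = []
--     used = set()
--     prev = None
--     for day in event_days:
--         names = day_to_names[day]
--         head = shift if prev is None else day - prev
--         output.append(f"{head}.{names[0]}")
--         output.extend(f"0.{name}" for name in names[1:])
--         used.update(names)
--         prev = day
--     if len(used) == 1:
--         return ";".join(output + output)
--     return ";".join(output)
--
-- def collapse_event_matrix_wrapper(event_string):
--     filtered = {k: v for k, v in event_string.items() if any(val != 0 for val in v)}
--     if not filtered:
--         return [""], {}
--
--     length_groups = defaultdict(dict)
--     for k, v in filtered.items():
--         length_groups[len(v)][k] = v
--
--     results = []
--     tracker = {}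
--     for length, group in length_groups.items():
--         results.append(_collapse(group, length))
--         tracker[f"len_{length}"] = len(group)
--     return results, tracker
-- ===== Notes on version B (the rewrite author's own statement) =====
-- stated objective: simpler
-- what changed: B drops A's unified 0/1 day matrix, the precomputed event-day list and the per-day rescan of all components: one pass over the components in sorted order fills a day->names dict (each day list already sorted), and the output is built by iterating the sorted event days while tracking the previous day for the delta.
import Mathlib
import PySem

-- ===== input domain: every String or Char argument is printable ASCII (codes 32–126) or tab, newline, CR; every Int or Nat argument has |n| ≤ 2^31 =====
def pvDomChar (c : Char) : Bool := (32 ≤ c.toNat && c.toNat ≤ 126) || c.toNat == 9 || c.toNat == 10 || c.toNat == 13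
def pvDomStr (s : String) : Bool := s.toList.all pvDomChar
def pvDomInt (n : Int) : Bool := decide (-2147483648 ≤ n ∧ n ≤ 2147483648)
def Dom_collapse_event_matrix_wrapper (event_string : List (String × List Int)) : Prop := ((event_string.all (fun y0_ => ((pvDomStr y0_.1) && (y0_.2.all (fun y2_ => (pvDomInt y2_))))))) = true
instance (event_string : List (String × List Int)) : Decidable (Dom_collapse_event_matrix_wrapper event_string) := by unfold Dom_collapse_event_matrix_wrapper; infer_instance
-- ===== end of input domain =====

-- B inverts A's per-day rescan: one pass over sorted components fills a day -> names dict,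
-- so the unified 0/1 matrix and the repeated component scans disappear (objective: simpler).


-- ===== PORT A =====
-- collapse_event_matrix, as called from the wrapper.  Two unreachable-at-call-site details:
-- num_days = len(next(iter(...))) (callers pass a non-empty dict, ported as headD []), and the
-- length-mismatch ValueError (callers group by exact length, so it never fires; a raise is not
-- representable, and on every actual call the port below is exact).
def cemA (d : PySem.Dict String (List Int)) : String :=
  let components := PySem.List.sorted d.keys (fun x => x) false
  let num_days := PySem.List.len (d.values.headD [])
  let unified := d.values.foldl (fun u v =>
      (PySem.List.enumerate v).foldl
        (fun u p => if p.2 == 1 then PySem.List.pySetD u p.1 1 else u) u)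
    (List.replicate num_days.toNat (0 : Int))
  let event_days := (PySem.List.enumerate unified).foldl
      (fun acc p => if p.2 == 1 then acc ++ [p.1] else acc) []
  let tag_entries := event_days.foldl (fun acc day =>
      let active := PySem.List.sorted
        (components.foldl (fun l comp =>
            if PySem.List.pyGetD (d.getD comp []) day 0 == 1 then l ++ [comp] else l) [])
        (fun x => x) false
      if active ≠ [] then acc ++ [(day, active)] else acc) ([] : List (Int × List String))
  if tag_entries = [] then "" else
  let last_day := (PySem.List.pyGetD tag_entries (-1) (0, [])).1
  let shift := num_days - last_day
  let st := tag_entries.foldl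
    (fun (st : List String × Bool × Int × PySem.Set String) e =>
      let output := st.1; let used_shift := st.2.1
      let event_index := st.2.2.1; let fuse := st.2.2.2
      let names := e.2
      let main := PySem.List.pyGetD names 0 ""
      let tag := if !used_shift then PySem.Int.toStr shift ++ "." ++ main
        else PySem.Int.toStr (PySem.List.pyGetD event_days event_index 0 -
               PySem.List.pyGetD event_days (event_index - 1) 0) ++ "." ++ main
      let output := output ++ [tag]
      let fuse := PySem.Set.add fuse main
      let st2 := (names.drop 1).foldl
        (fun (st : List String × PySem.Set String) name =>
          (st.1 ++ ["0." ++ name], PySem.Set.add st.2 name)) (output, fuse)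
      (st2.1, true, event_index + 1, st2.2))
    ([], false, 0, PySem.Set.empty)
  if PySem.Set.len st.2.2.2 == 1 then PySem.Str.join ";" (st.1 ++ st.1)
  else PySem.Str.join ";" st.1

def collapse_event_matrix_wrapper (event_string : List (String × List Int)) :
    List String × (List (String × Int)) :=
  let d := PySem.Dict.ofList event_string   -- the Python argument is a dict
  -- dict comprehension over d.items: keys are already unique, so filtering the item list is exact
  let filtered := PySem.Dict.mk (d.items.filter (fun p => p.2.any (fun v => v != 0)))
  if filtered.items = [] then ([""], []) else
  let groups := filtered.items.foldl
    (fun g p => g.modify (PySem.List.len p.2) PySem.Dict.empty (fun sub => sub.insert p.1 p.2))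
    (PySem.Dict.empty : PySem.Dict Int (PySem.Dict String (List Int)))
  let st := groups.items.foldl
    (fun (st : List String × PySem.Dict String Int) e =>
      (st.1 ++ [cemA e.2],
       st.2.insert ("len_" ++ PySem.Int.toStr e.1) ((PySem.Dict.size e.2 : Int))))
    ([], PySem.Dict.empty)
  (st.1, st.2.items)

-- ===== PORT B =====
def cemB (group : PySem.Dict String (List Int)) (num_days : Int) : String :=
  let dtn := (PySem.List.sorted group.keys (fun x => x) false).foldl (fun dd comp =>
      (PySem.List.enumerate (group.getD comp [])).foldl
        (fun dd p => if p.2 == 1 then dd.modify p.1 [] (fun l => l ++ [comp]) else dd) dd)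
    (PySem.Dict.empty : PySem.Dict Int (List String))
  let event_days := PySem.List.sorted dtn.keys (fun x => x) false
  if event_days = [] then "" else
  let shift := num_days - PySem.List.pyGetD event_days (-1) 0
  let st := event_days.foldl
    (fun (st : List String × PySem.Set String × Option Int) day =>
      let names := dtn.getD day []
      let head := match st.2.2 with | none => shift | some p => day - p
      (st.1 ++ [PySem.Int.toStr head ++ "." ++ PySem.List.pyGetD names 0 ""]
            ++ (names.drop 1).map (fun n => "0." ++ n),
       PySem.Set.update st.2.1 names, some day))
    ([], PySem.Set.empty, none)
  if PySem.Set.len st.2.1 == 1 then PySem.Str.join ";" (st.1 ++ st.1)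
  else PySem.Str.join ";" st.1

def collapse_event_matrix_wrapper_alt (event_string : List (String × List Int)) :
    List String × (List (String × Int)) :=
  let d := PySem.Dict.ofList event_string
  let filtered := PySem.Dict.mk (d.items.filter (fun p => p.2.any (fun v => v != 0)))
  if filtered.items = [] then ([""], []) else
  let groups := filtered.items.foldl
    (fun g p => g.modify (PySem.List.len p.2) PySem.Dict.empty (fun sub => sub.insert p.1 p.2))
    (PySem.Dict.empty : PySem.Dict Int (PySem.Dict String (List Int)))
  let st := groups.items.foldl
    (fun (st : List String × PySem.Dict String Int) e =>
      (st.1 ++ [cemB e.2 e.1],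
       st.2.insert ("len_" ++ PySem.Int.toStr e.1) ((PySem.Dict.size e.2 : Int))))
    ([], PySem.Dict.empty)
  (st.1, st.2.items)

-- ===== PRECONDITION & SPEC =====
def Spec_collapse_event_matrix_wrapper (event_string : List (String × List Int)) (out : List String × (List (String × Int))) : Prop := out = collapse_event_matrix_wrapper_alt event_string
instance (event_string : List (String × List Int)) (out : List String × (List (String × Int))) : Decidable (Spec_collapse_event_matrix_wrapper event_string out) := by unfold Spec_collapse_event_matrix_wrapper; infer_instance

-- ===== CLAIM (what is proved, stated in full; the proofs are below) =====
def Claim_equal_collapse_event_matrix_wrapper : Prop := ∀ (event_string : List (String × List Int)), Dom_collapse_event_matrix_wrapper event_string → Spec_collapse_event_matrix_wrapper event_string (collapse_event_matrix_wrapper event_string)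

-- ===== LEMMAS AND PROOFS =====

-- enumerate unfolds
lemma enum_nil {α : Type} (s : Int) : PySem.List.enumerate ([] : List α) s = [] := rfl
lemma enum_cons {α : Type} (x : α) (t : List α) (s : Int) :
    PySem.List.enumerate (x :: t) s = (s, x) :: PySem.List.enumerate t (s + 1) := rfl

lemma enum_append {α : Type} (xs ys : List α) : ∀ s : Int,
    PySem.List.enumerate (xs ++ ys) s
      = PySem.List.enumerate xs s ++ PySem.List.enumerate ys (s + xs.length) := by
  induction xs with
  | nil => intro s; simp [enum_nil]
  | cons x t ih => intro s; simp [enum_cons, ih, add_assoc]; ring_nf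

-- membership in enumerate
lemma mem_enum (v : List Int) : ∀ (s : Nat) (q : Int × Int),
    q ∈ PySem.List.enumerate v (s : Int) ↔
      ∃ j : Nat, j < v.length ∧ q.1 = ((s + j : Nat) : Int) ∧ v.getD j 0 = q.2 := by
  induction v with
  | nil => intro s q; simp [enum_nil]
  | cons x t ih =>
    intro s q
    have hc : ((s:Int) + 1) = ((s+1 : Nat) : Int) := by push_cast; ring
    rw [enum_cons, hc]
    constructor
    · intro h
      rcases List.mem_cons.1 h with h | h
      · subst h; exact ⟨0, by simp, by simp, by simp⟩
      · rcases (ih (s+1) q).1 h with ⟨j, hj, h1, h2⟩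
        refine ⟨j+1, by simpa using Nat.succ_lt_succ hj, ?_, by simpa using h2⟩
        rw [h1]; congr 1; omega
    · rintro ⟨j, hj, h1, h2⟩
      cases j with
      | zero =>
        apply List.mem_cons.2; left
        simp only [List.getD_cons_zero] at h2
        obtain ⟨q1, q2⟩ := q
        simp only [Nat.add_zero] at h1
        simp_all
      | succ j =>
        apply List.mem_cons.2; right
        refine (ih (s+1) q).2 ⟨j, by simpa using Nat.lt_of_succ_lt_succ hj, ?_, by simpa using h2⟩
        rw [h1]; congr 1; omega

-- A-side: the inner write loop of `unified`
lemma uniStep_get (v : List Int) : ∀ (s : Nat) (u : List Int) (j : Nat),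
    ((PySem.List.enumerate v (s : Int)).foldl
      (fun u p => if p.2 == 1 then PySem.List.pySetD u p.1 1 else u) u)[j]?
    = if s ≤ j ∧ j - s < v.length ∧ v.getD (j - s) 0 = 1 then
        (if j < u.length then some (1:Int) else none)
      else u[j]? := by
  induction v with
  | nil => intro s u j; simp [enum_nil]
  | cons x t ih =>
    intro s u j
    have hc : ((s:Int) + 1) = ((s+1 : Nat) : Int) := by push_cast; ring
    rw [enum_cons, hc]
    simp only [List.foldl_cons]
    have hstep : (if x == 1 then PySem.List.pySetD u (s:Int) 1 else u)
        = if x = 1 then u.set s (1:Int) else u := by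
      split_ifs with h1 h2 h2 <;> simp_all [PySem.List.pySetD_natCast]
    rw [hstep]
    by_cases hx : x = 1
    · subst hx
      rw [if_pos rfl, ih]
      have hlen : (u.set s (1:Int)).length = u.length := by simp
      rw [hlen]
      by_cases hj2 : s + 1 ≤ j ∧ j - (s+1) < t.length ∧ t.getD (j - (s+1)) 0 = 1
      · have hcond : s ≤ j ∧ j - s < ((1:Int) :: t).length ∧ ((1:Int) :: t).getD (j - s) 0 = 1 := by
          have e1 : j - s = (j - (s+1)) + 1 := by omega
          exact ⟨by omega, by simp; omega, by rw [e1, List.getD_cons_succ]; exact hj2.2.2⟩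
        rw [if_pos hj2, if_pos hcond]
      · rw [if_neg hj2]
        by_cases hj : j = s
        · subst hj
          rw [if_pos ⟨le_rfl, by simp, by simp⟩]
          rw [List.getElem?_set, if_pos rfl]
        · by_cases hcond : s ≤ j ∧ j - s < (((1:Int)) :: t).length ∧ (((1:Int)) :: t).getD (j - s) 0 = 1
          · exfalso
            apply hj2
            have e1 : j - s = (j - (s+1)) + 1 := by omega
            refine ⟨by omega, ?_, ?_⟩
            · have := hcond.2.1; simp at this; omega
            · have := hcond.2.2; rwa [e1, List.getD_cons_succ] at this
          · rw [if_neg hcond, List.getElem?_set, if_neg (by omega : ¬ s = j)]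
    · rw [if_neg hx, ih]
      by_cases hj2 : s + 1 ≤ j ∧ j - (s+1) < t.length ∧ t.getD (j - (s+1)) 0 = 1
      · have hcond : s ≤ j ∧ j - s < (x :: t).length ∧ (x :: t).getD (j - s) 0 = 1 := by
          have e1 : j - s = (j - (s+1)) + 1 := by omega
          exact ⟨by omega, by simp; omega, by rw [e1, List.getD_cons_succ]; exact hj2.2.2⟩
        rw [if_pos hj2, if_pos hcond]
      · rw [if_neg hj2, if_neg]
        rintro ⟨h1, h2, h3⟩
        apply hj2
        by_cases hj : j = s
        · exfalso; apply hx; subst hj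
          simpa [(by omega : j - j = 0)] using h3
        · have e1 : j - s = (j - (s+1)) + 1 := by omega
          rw [e1, List.getD_cons_succ] at h3
          simp at h2
          exact ⟨by omega, by omega, h3⟩

-- the whole `unified` computation, as an explicit table
lemma unified_eq (vs : List (List Int)) (n : Nat) (hvs : ∀ v ∈ vs, v.length = n) :
    vs.foldl (fun u v =>
      (PySem.List.enumerate v 0).foldl
        (fun u p => if p.2 == 1 then PySem.List.pySetD u p.1 1 else u) u)
      (List.replicate n (0:Int))
    = (List.range n).map (fun j => if vs.any (fun v => v.getD j 0 == 1) then (1:Int) else 0) := by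
  induction vs using List.reverseRecOn with
  | nil => apply List.ext_getElem? ; intro j; by_cases hj : j < n <;>
      simp [List.getElem?_replicate, List.getElem?_range, hj]
  | append_singleton vs v ih =>
    rw [List.foldl_append, ih (fun w hw => hvs w (by simp [hw]))]
    apply List.ext_getElem?
    intro j
    rw [List.foldl_cons, List.foldl_nil]
    have hstep := uniStep_get v 0 ((List.range n).map (fun j => if vs.any (fun v => v.getD j 0 == 1) then (1:Int) else 0)) j
    simp only [Nat.cast_zero] at hstep
    rw [hstep]
    have hlen : v.length = n := hvs v (by simp)
    have hmap : ∀ (f : Nat → Int), ((List.range n).map f).length = n := by simp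
    by_cases hj : j < n
    · have hget : ((List.range n).map (fun j => if vs.any (fun v => v.getD j 0 == 1) then (1:Int) else 0))[j]? = some (if vs.any (fun v => v.getD j 0 == 1) then (1:Int) else 0) := by
        simp [List.getElem?_map, List.getElem?_range, hj]
      have hget' : ((List.range n).map (fun j => if (vs ++ [v]).any (fun v => v.getD j 0 == 1) then (1:Int) else 0))[j]? = some (if (vs ++ [v]).any (fun v => v.getD j 0 == 1) then (1:Int) else 0) := by
        simp [List.getElem?_map, List.getElem?_range, hj]
      rw [hget', hmap]
      by_cases hv : v.getD j 0 = 1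
      · rw [if_pos ⟨by omega, by omega, by rwa [Nat.sub_zero]⟩, if_pos hj]
        have hv' : v[j]?.getD 0 = 1 := by simpa [List.getD] using hv
        simp [hv']
      · rw [if_neg (by rintro ⟨-, -, hh⟩; rw [Nat.sub_zero] at hh; exact hv hh), hget]
        have hv' : ¬ (v[j]?.getD 0 = 1) := by simpa [List.getD] using hv
        have : (vs ++ [v]).any (fun v => v.getD j 0 == 1) = vs.any (fun v => v.getD j 0 == 1) := by
          simp [List.any_append, hv']
        rw [this]
    · rw [if_neg (by omega : ¬ (0 ≤ j ∧ j - 0 < v.length ∧ v.getD (j - 0) 0 = 1))]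
      simp [List.getElem?_map, List.getElem?_range, hj]

-- enumerate of an explicit table
lemma enum_map_range {α : Type} (f : Nat → α) (n : Nat) :
    PySem.List.enumerate ((List.range n).map f) 0
      = (List.range n).map (fun (j : Nat) => (((j:Nat) : Int), f j)) := by
  induction n with
  | zero => simp [enum_nil]
  | succ n ih =>
    rw [List.range_succ, List.map_append, enum_append, ih]
    simp [enum_cons, enum_nil]

-- A-side: the event-day collection loop over the table
lemma event_days_eq (c : Nat → Bool) (n : Nat) :
    (PySem.List.enumerate ((List.range n).map (fun j => if c j then (1:Int) else 0)) 0).foldl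
      (fun acc p => if p.2 == 1 then acc ++ [p.1] else acc) ([] : List Int)
    = ((List.range n).filter c).map (fun (j : Nat) => ((j:Nat):Int)) := by
  rw [PySem.List.foldl_append_if (fun (p : Int × Int) => p.2 == 1) (fun (p : Int × Int) => p.1), enum_map_range]
  rw [List.filter_map, List.map_map]
  simp only [List.nil_append]
  have : ∀ j : Nat, ((fun (p : Int × Int) => p.2 == 1) ∘ (fun (j:Nat) => (((j:Nat):Int), if c j then (1:Int) else 0))) j = c j := by
    intro j; by_cases h : c j <;> simp [h]
  rw [List.filter_congr (fun j _ => this j)]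
  rfl

-- B-side: at most one entry of enumerate matches a given day
lemma enum_filter_day (v : List Int) : ∀ (s d : Nat),
    (PySem.List.enumerate v (s:Int)).filter (fun p => p.1 == ((d:Nat):Int) && p.2 == 1)
    = if s ≤ d ∧ d - s < v.length ∧ v.getD (d - s) 0 = 1 then [(((d:Nat):Int), (1:Int))] else [] := by
  induction v with
  | nil => intro s d; simp [enum_nil]
  | cons x t ih =>
    intro s d
    have hc : ((s:Int) + 1) = ((s+1 : Nat) : Int) := by push_cast; ring
    rw [enum_cons, hc, List.filter_cons, ih (s+1) d]
    by_cases hsd : s = d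
    · subst hsd
      have hz : (s:Nat) - s = 0 := by omega
      have hno : ¬ (s + 1 ≤ s ∧ s - (s+1) < t.length ∧ t.getD (s - (s+1)) 0 = 1) := by omega
      rw [if_neg hno]
      by_cases hx : x = 1
      · subst hx
        have hcnd : s ≤ s ∧ s - s < ((1:Int) :: t).length ∧ ((1:Int) :: t).getD (s - s) 0 = 1 :=
          ⟨le_rfl, by simp, by simp [hz]⟩
        rw [if_pos hcnd]
        simp
      · have hcnd : ¬ (s ≤ s ∧ s - s < (x :: t).length ∧ (x :: t).getD (s - s) 0 = 1) := by
          rintro ⟨-, -, hh⟩; exact hx (by simpa [hz] using hh)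
        rw [if_neg hcnd]
        simp [hx]
    · have hne : ¬ ((s:Int) = ((d:Nat):Int)) := by exact_mod_cast hsd
      have hb : ((((s:Int), x) : Int × Int).1 == ((d:Nat):Int) && (((s:Int), x) : Int × Int).2 == 1) = false := by
        simp [hne]
      rw [hb]
      simp only [Bool.false_eq_true, if_false]
      by_cases h2 : s + 1 ≤ d ∧ d - (s+1) < t.length ∧ t.getD (d - (s+1)) 0 = 1
      · have hcnd : s ≤ d ∧ d - s < (x :: t).length ∧ (x :: t).getD (d - s) 0 = 1 := by
          have e1 : d - s = (d - (s+1)) + 1 := by omega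
          exact ⟨by omega, by simp; omega, by rw [e1, List.getD_cons_succ]; exact h2.2.2⟩
        rw [if_pos h2, if_pos hcnd]
      · rw [if_neg h2, if_neg]
        rintro ⟨ha, hbb, hh⟩
        by_cases hlt : s < d
        · have e1 : d - s = (d - (s+1)) + 1 := by omega
          rw [e1, List.getD_cons_succ] at hh
          simp at hbb
          exact h2 ⟨by omega, by omega, hh⟩
        · omega

-- a flatMap producing singletons is a filter
lemma flatMap_singleton_filter {α : Type} (Q : α → Bool) (l : List α) :
    l.flatMap (fun c => if Q c then [c] else []) = l.filter Q := by
  induction l with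
  | nil => rfl
  | cons x t ih =>
    rw [List.flatMap_cons, ih, List.filter_cons]
    by_cases h : Q x <;> simp [h]

lemma getD_map_cast (l : List Nat) (k : Nat) (hk : k < l.length) :
    (l.map (fun (j : Nat) => ((j:Nat):Int))).getD k 0 = ((l.getD k 0 : Nat) : Int) := by
  rw [List.getD_eq_getElem?_getD, List.getD_eq_getElem?_getD, List.getElem?_map]
  simp [List.getElem?_eq_getElem hk]

-- the two output loops agree
lemma loop_eq (shift : Int) (nm : Nat → List String) (ED : List Nat)
    (hnm : ∀ j ∈ ED, nm j ≠ []) :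
    ∀ (ds : List Nat) (k : Nat), ED.drop k = ds → ∀ (out : List String) (fuse : PySem.Set String),
      (ds.foldl (fun (st : List String × Bool × Int × PySem.Set String) j =>
          ((st.1 ++ [(if !st.2.1 then PySem.Int.toStr shift ++ "." ++ PySem.List.pyGetD (nm j) 0 ""
              else PySem.Int.toStr (PySem.List.pyGetD (ED.map (fun (j : Nat) => ((j:Nat):Int))) st.2.2.1 0 -
                     PySem.List.pyGetD (ED.map (fun (j : Nat) => ((j:Nat):Int))) (st.2.2.1 - 1) 0) ++ "." ++ PySem.List.pyGetD (nm j) 0 "")])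
             ++ ((nm j).drop 1).map (fun name => "0." ++ name),
           true, st.2.2.1 + 1,
           PySem.Set.update (PySem.Set.add st.2.2.2 (PySem.List.pyGetD (nm j) 0 "")) ((nm j).drop 1)))
        (out, decide (k ≠ 0), (k : Int), fuse)).1
      = (ds.foldl (fun (st : List String × PySem.Set String × Option Int) j =>
          (st.1 ++ [PySem.Int.toStr (match st.2.2 with | none => shift | some p => ((j:Nat):Int) - p) ++ "." ++ PySem.List.pyGetD (nm j) 0 ""]
              ++ ((nm j).drop 1).map (fun name => "0." ++ name),
           PySem.Set.update st.2.1 (nm j), some ((j:Nat):Int)))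
        (out, fuse, if k = 0 then none else some ((ED.getD (k-1) 0 : Nat) : Int))).1
    ∧ (ds.foldl (fun (st : List String × Bool × Int × PySem.Set String) j =>
          ((st.1 ++ [(if !st.2.1 then PySem.Int.toStr shift ++ "." ++ PySem.List.pyGetD (nm j) 0 ""
              else PySem.Int.toStr (PySem.List.pyGetD (ED.map (fun (j : Nat) => ((j:Nat):Int))) st.2.2.1 0 -
                     PySem.List.pyGetD (ED.map (fun (j : Nat) => ((j:Nat):Int))) (st.2.2.1 - 1) 0) ++ "." ++ PySem.List.pyGetD (nm j) 0 "")])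
             ++ ((nm j).drop 1).map (fun name => "0." ++ name),
           true, st.2.2.1 + 1,
           PySem.Set.update (PySem.Set.add st.2.2.2 (PySem.List.pyGetD (nm j) 0 "")) ((nm j).drop 1)))
        (out, decide (k ≠ 0), (k : Int), fuse)).2.2.2
      = (ds.foldl (fun (st : List String × PySem.Set String × Option Int) j =>
          (st.1 ++ [PySem.Int.toStr (match st.2.2 with | none => shift | some p => ((j:Nat):Int) - p) ++ "." ++ PySem.List.pyGetD (nm j) 0 ""]
              ++ ((nm j).drop 1).map (fun name => "0." ++ name),
           PySem.Set.update st.2.1 (nm j), some ((j:Nat):Int)))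
        (out, fuse, if k = 0 then none else some ((ED.getD (k-1) 0 : Nat) : Int))).2.1 := by
  intro ds
  induction ds with
  | nil => intro k hk out fuse; exact ⟨rfl, rfl⟩
  | cons j t ih =>
    intro k hk out fuse
    have hklen : k < ED.length := by
      by_contra h
      rw [List.drop_eq_nil_of_le (by omega)] at hk
      exact (List.cons_ne_nil j t) hk.symm
    have hEDk : ED[k]? = some j := by
      have : (ED.drop k)[0]? = some j := by rw [hk]; rfl
      rwa [List.getElem?_drop, Nat.add_zero] at this
    have hEDkD : ED.getD k 0 = j := by rw [List.getD_eq_getElem?_getD, hEDk]; rfl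
    have hdrop : ED.drop (k+1) = t := by
      have : ED.drop (k+1) = (ED.drop k).drop 1 := by rw [List.drop_drop, Nat.add_comm]
      rw [this, hk]; rfl
    rw [List.foldl_cons, List.foldl_cons]
    have htag : (if !(decide (k ≠ 0)) then PySem.Int.toStr shift ++ "." ++ PySem.List.pyGetD (nm j) 0 ""
        else PySem.Int.toStr (PySem.List.pyGetD (ED.map (fun (j : Nat) => ((j:Nat):Int))) ((k:Int)) 0 -
               PySem.List.pyGetD (ED.map (fun (j : Nat) => ((j:Nat):Int))) (((k:Int)) - 1) 0) ++ "." ++ PySem.List.pyGetD (nm j) 0 "")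
        = PySem.Int.toStr (match (if k = 0 then (none : Option Int) else some ((ED.getD (k-1) 0 : Nat) : Int)) with
            | none => shift | some p => ((j:Nat):Int) - p) ++ "." ++ PySem.List.pyGetD (nm j) 0 "" := by
      by_cases hk0 : k = 0
      · subst hk0; simp
      · rw [if_neg hk0]
        have h1 : (!(decide (k ≠ 0))) = false := by simp [hk0]
        rw [h1]
        simp only [Bool.false_eq_true, if_false]
        have e1 : ((k:Int)) - 1 = (((k-1 : Nat)):Int) := by omega
        rw [e1, PySem.List.pyGetD_natCast, PySem.List.pyGetD_natCast,
          getD_map_cast ED k hklen, getD_map_cast ED (k-1) (by omega), hEDkD]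
    have hfuse : PySem.Set.update (PySem.Set.add fuse (PySem.List.pyGetD (nm j) 0 "")) ((nm j).drop 1)
        = PySem.Set.update fuse (nm j) := by
      have hne : nm j ≠ [] := hnm j (by
        have : j ∈ ED.drop k := by rw [hk]; exact List.mem_cons_self
        exact List.mem_of_mem_drop this)
      obtain ⟨x, xs, hx⟩ := List.exists_cons_of_ne_nil hne
      rw [hx, PySem.Set.update_cons]
      simp [PySem.List.pyGetD_zero_cons]
    rw [htag, hfuse]
    have := ih (k+1) hdrop
      (out ++ [PySem.Int.toStr (match (if k = 0 then (none : Option Int) else some ((ED.getD (k-1) 0 : Nat) : Int)) with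
            | none => shift | some p => ((j:Nat):Int) - p) ++ "." ++ PySem.List.pyGetD (nm j) 0 ""]
        ++ ((nm j).drop 1).map (fun name => "0." ++ name))
      (PySem.Set.update fuse (nm j))
    have h2 : decide (k + 1 ≠ 0) = true := by simp
    have h3 : ((k:Int)) + 1 = (((k+1 : Nat)):Int) := by omega
    have h4 : (if k + 1 = 0 then (none : Option Int) else some ((ED.getD (k+1-1) 0 : Nat) : Int)) = some ((j:Nat):Int) := by
      rw [if_neg (by omega), Nat.add_sub_cancel, hEDkD]
    rw [h2, h4] at this
    rw [h3]
    exact this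

lemma any_values_iff (g : PySem.Dict String (List Int)) (hnd : g.keys.Nodup) (P : List Int → Bool) :
    g.values.any P = true ↔ ∃ cmp ∈ g.keys, P (g.getD cmp []) = true := by
  have hv : g.values = g.items.map (·.2) := rfl
  have hk : g.keys = g.items.map (·.1) := rfl
  constructor
  · intro h
    rw [hv, List.any_eq_true] at h
    obtain ⟨v, hvm, hPv⟩ := h
    obtain ⟨p, hp, rfl⟩ := List.mem_map.1 hvm
    refine ⟨p.1, by rw [hk]; exact List.mem_map.2 ⟨p, hp, rfl⟩, ?_⟩
    rw [PySem.Dict.getD_of_mem_items g (by simpa using hp) hnd []]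
    exact hPv
  · rintro ⟨cmp, hcm, hP⟩
    rw [hk] at hcm
    obtain ⟨p, hp, rfl⟩ := List.mem_map.1 hcm
    rw [hv, List.any_eq_true]
    refine ⟨p.2, List.mem_map.2 ⟨p, hp, rfl⟩, ?_⟩
    rwa [PySem.Dict.getD_of_mem_items g (by simpa using hp) hnd []] at hP

lemma enum_filter_day0 (v : List Int) (d : Nat) :
    (PySem.List.enumerate v 0).filter (fun p => p.1 == ((d:Nat):Int) && p.2 == 1)
    = if d < v.length ∧ v.getD d 0 = 1 then [(((d:Nat):Int), (1:Int))] else [] := by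
  have h := enum_filter_day v 0 d
  rw [show (((0:Nat)):Int) = 0 from rfl] at h
  rw [h]
  by_cases hc : d < v.length ∧ v.getD d 0 = 1
  · rw [if_pos ⟨by omega, by simpa using hc.1, by simpa using hc.2⟩, if_pos hc]
  · rw [if_neg (by rintro ⟨-, hb, hh⟩; exact hc ⟨by simpa using hb, by simpa using hh⟩), if_neg hc]

-- the tag_entries loop is a map over the event days
lemma fold_if_pairs (act : Int → List String) (nm : Nat → List String) (l : List Nat)
    (h1 : ∀ j ∈ l, act ((j:Nat):Int) = nm j) (h2 : ∀ j ∈ l, nm j ≠ []) :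
    ∀ acc, (l.map (fun (j:Nat) => ((j:Nat):Int))).foldl
        (fun acc day => if act day ≠ [] then acc ++ [(day, act day)] else acc) acc
      = acc ++ l.map (fun (j:Nat) => (((j:Nat):Int), nm j)) := by
  induction l with
  | nil => intro acc; simp
  | cons j t ih =>
    intro acc
    rw [List.map_cons, List.foldl_cons]
    have hj := h1 j List.mem_cons_self
    have hne := h2 j List.mem_cons_self
    rw [List.map_cons]
    have : (if act ((j:Nat):Int) ≠ [] then acc ++ [(((j:Nat):Int), act ((j:Nat):Int))] else acc)
        = acc ++ [(((j:Nat):Int), nm j)] := by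
      rw [hj, if_pos hne]
    rw [this, ih (fun x hx => h1 x (List.mem_cons_of_mem j hx)) (fun x hx => h2 x (List.mem_cons_of_mem j hx))]
    simp

-- the A output loop in the canonical step shape
lemma a_fold_shape (nm : Nat → List String) (S : Int) (ED : List Nat) (l : List Nat) :
    ∀ st, (l.map (fun (j:Nat) => (((j:Nat):Int), nm j))).foldl
      (fun (st : List String × Bool × Int × PySem.Set String) e =>
        ((List.foldl (fun st name => (st.1 ++ ["0." ++ name], st.2.add name))
            (st.1 ++ [if (!st.2.1) = true then PySem.Int.toStr S ++ "." ++ PySem.List.pyGetD e.2 0 ""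
               else PySem.Int.toStr (PySem.List.pyGetD (ED.map (fun (j : Nat) => ((j:Nat):Int))) st.2.2.1 0 -
                      PySem.List.pyGetD (ED.map (fun (j : Nat) => ((j:Nat):Int))) (st.2.2.1 - 1) 0) ++ "." ++ PySem.List.pyGetD e.2 0 ""],
             st.2.2.2.add (PySem.List.pyGetD e.2 0 "")) (List.drop 1 e.2)).1,
         true, st.2.2.1 + 1,
         (List.foldl (fun st name => (st.1 ++ ["0." ++ name], st.2.add name))
            (st.1 ++ [if (!st.2.1) = true then PySem.Int.toStr S ++ "." ++ PySem.List.pyGetD e.2 0 ""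
               else PySem.Int.toStr (PySem.List.pyGetD (ED.map (fun (j : Nat) => ((j:Nat):Int))) st.2.2.1 0 -
                      PySem.List.pyGetD (ED.map (fun (j : Nat) => ((j:Nat):Int))) (st.2.2.1 - 1) 0) ++ "." ++ PySem.List.pyGetD e.2 0 ""],
             st.2.2.2.add (PySem.List.pyGetD e.2 0 "")) (List.drop 1 e.2)).2)) st
    = l.foldl (fun (st : List String × Bool × Int × PySem.Set String) j =>
          ((st.1 ++ [(if !st.2.1 then PySem.Int.toStr S ++ "." ++ PySem.List.pyGetD (nm j) 0 ""
              else PySem.Int.toStr (PySem.List.pyGetD (ED.map (fun (j : Nat) => ((j:Nat):Int))) st.2.2.1 0 -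
                     PySem.List.pyGetD (ED.map (fun (j : Nat) => ((j:Nat):Int))) (st.2.2.1 - 1) 0) ++ "." ++ PySem.List.pyGetD (nm j) 0 "")])
             ++ ((nm j).drop 1).map (fun name => "0." ++ name),
           true, st.2.2.1 + 1,
           PySem.Set.update (PySem.Set.add st.2.2.2 (PySem.List.pyGetD (nm j) 0 "")) ((nm j).drop 1))) st := by
  induction l with
  | nil => intro st; rfl
  | cons j t ih =>
    intro st
    rw [List.map_cons, List.foldl_cons, List.foldl_cons, ih]
    congr 1
    rw [PySem.List.foldl_prod_mk (f := fun o name => o ++ ["0." ++ name]) (g := fun s name => PySem.Set.add s name)]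
    rw [PySem.List.foldl_append_singleton_eq_map]
    rfl

-- the B output loop in the canonical step shape
lemma b_fold_shape (nm : Nat → List String) (S : Int) (names : Int → List String) (l : List Nat)
    (h : ∀ j ∈ l, names ((j:Nat):Int) = nm j) :
    ∀ st, (l.map (fun (j:Nat) => ((j:Nat):Int))).foldl
      (fun (st : List String × PySem.Set String × Option Int) day =>
        (st.1 ++ [PySem.Int.toStr (match st.2.2 with | none => S | some p => day - p) ++ "." ++ PySem.List.pyGetD (names day) 0 ""]
            ++ (List.drop 1 (names day)).map (fun n => "0." ++ n),
         st.2.1.update (names day), some day)) st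
    = l.foldl (fun (st : List String × PySem.Set String × Option Int) j =>
          (st.1 ++ [PySem.Int.toStr (match st.2.2 with | none => S | some p => ((j:Nat):Int) - p) ++ "." ++ PySem.List.pyGetD (nm j) 0 ""]
              ++ ((nm j).drop 1).map (fun name => "0." ++ name),
           PySem.Set.update st.2.1 (nm j), some ((j:Nat):Int))) st := by
  induction l with
  | nil => intro st; rfl
  | cons j t ih =>
    intro st
    rw [List.map_cons, List.foldl_cons, List.foldl_cons,
      ih (fun x hx => h x (List.mem_cons_of_mem j hx))]
    rw [h j List.mem_cons_self]

theorem cem_eq (g : PySem.Dict String (List Int)) (L : Int)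
    (hnd : g.keys.Nodup) (hne : g.items ≠ [])
    (hlen : ∀ p ∈ g.items, PySem.List.len p.2 = L) :
    cemA g = cemB g L := by
  obtain ⟨p0, rest, hitems⟩ := List.exists_cons_of_ne_nil hne
  have hvals0 : g.values = g.items.map (·.2) := rfl
  have hkeys0 : g.keys = g.items.map (·.1) := rfl
  have hhead : g.values.headD [] = p0.2 := by rw [hvals0, hitems]; rfl
  have hL : L = ((p0.2.length : Nat) : Int) := by
    have := hlen p0 (by rw [hitems]; exact List.mem_cons_self)
    rw [PySem.List.len_eq] at this
    omega
  have hval : ∀ v ∈ g.values, v.length = p0.2.length := by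
    intro v hv
    rw [hvals0] at hv
    obtain ⟨p, hp, rfl⟩ := List.mem_map.1 hv
    have := hlen p hp
    rw [PySem.List.len_eq, hL] at this
    exact_mod_cast this
  -- abbreviations
  have hcomps_perm : (PySem.List.sorted g.keys (fun x => x) false).Perm g.keys :=
    PySem.List.sorted_perm g.keys (fun x => x) false
  have hcomps_nd : (PySem.List.sorted g.keys (fun x => x) false).Nodup :=
    hcomps_perm.nodup_iff.2 hnd
  have hcomps_lt : (PySem.List.sorted g.keys (fun x => x) false).Pairwise (· < ·) := by
    have h1 := PySem.List.sorted_pairwise g.keys (fun x => x)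
    have h2 := hcomps_nd
    exact (h1.and h2).imp (fun h => lt_of_le_of_ne h.1 h.2)
  have hglen : ∀ c ∈ g.keys, (g.getD c []).length = p0.2.length := by
    intro c hc
    rw [hkeys0] at hc
    obtain ⟨p, hp, rfl⟩ := List.mem_map.1 hc
    rw [PySem.Dict.getD_of_mem_items g (by simpa using hp) hnd []]
    exact hval p.2 (by rw [hvals0]; exact List.mem_map.2 ⟨p, hp, rfl⟩)
  set n := p0.2.length with hn
  set nm : Nat → List String := fun j =>
    (PySem.List.sorted g.keys (fun x => x) false).filter
      (fun comp => (g.getD comp []).getD j 0 == 1) with hnm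
  set EDn : List Nat := (List.range n).filter
      (fun j => g.values.any (fun v => v.getD j 0 == 1)) with hEDn
  have hnm_lt : ∀ j, (nm j).Pairwise (· < ·) := fun j => hcomps_lt.filter _
  have hnm_sorted : ∀ j, PySem.List.sorted (nm j) (fun x => x) false = nm j := fun j =>
    PySem.List.sorted_eq_of_perm_of_pairwise_lt (nm j) (nm j) (fun x => x) (List.Perm.refl _) (hnm_lt j)
  have hEDn_lt : (EDn.map (fun (j:Nat) => ((j:Nat):Int))).Pairwise (· < ·) := by
    rw [List.pairwise_map]
    exact (List.pairwise_lt_range.filter _).imp (fun h => by exact_mod_cast h)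
  have hEDn_nd : (EDn.map (fun (j:Nat) => ((j:Nat):Int))).Nodup :=
    hEDn_lt.imp (fun h => ne_of_lt h)
  have hcED : ∀ j ∈ EDn, nm j ≠ [] := by
    intro j hj
    have hc : g.values.any (fun v => v.getD j 0 == 1) = true := (List.mem_filter.1 hj).2
    obtain ⟨cmp, hcm, hP⟩ := (any_values_iff g hnd _).1 hc
    have : cmp ∈ nm j := by
      rw [hnm]
      exact List.mem_filter.2 ⟨hcomps_perm.mem_iff.2 hcm, hP⟩
    exact List.ne_nil_of_mem this
  have hact : ∀ j ∈ EDn,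
      (PySem.List.sorted
        (List.foldl (fun l comp =>
            if (PySem.List.pyGetD (g.getD comp []) ((j:Nat):Int) 0 == 1) = true then l ++ [comp] else l)
          [] (PySem.List.sorted g.keys (fun x => x) false))
        (fun x => x) false) = nm j := by
    intro j hj
    rw [PySem.List.foldl_append_if_eq_filter
      (fun comp => PySem.List.pyGetD (g.getD comp []) ((j:Nat):Int) 0 == 1), List.nil_append]
    rw [List.filter_congr (fun comp _ => by rw [PySem.List.pyGetD_natCast])]
    exact hnm_sorted j
  simp only [cemA, cemB]
  rw [hhead, PySem.List.len_eq]
  rw [show ((((n:Nat):Int)).toNat) = n from Int.toNat_natCast n]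
  rw [unified_eq g.values n hval]
  rw [event_days_eq (fun j => g.values.any (fun v => v.getD j 0 == 1)) n]
  rw [fold_if_pairs _ nm EDn hact hcED []]
  rw [List.nil_append]
  -- B side: flatten the day->names dict build into one fold over (day, comp) pairs
  set pc : String → List (Int × String) := fun c =>
    ((PySem.List.enumerate (g.getD c []) 0).filter (fun p => p.2 == 1)).map (fun p => (p.1, c)) with hpc
  set pairs : List (Int × String) := (PySem.List.sorted g.keys (fun x => x) false).flatMap pc with hpairs
  have hdtn : (PySem.List.sorted g.keys (fun x => x) false).foldl
      (fun dd comp => (PySem.List.enumerate (g.getD comp [])).foldl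
        (fun dd p => if (p.2 == 1) = true then dd.modify p.1 [] (fun l => l ++ [comp]) else dd) dd)
      PySem.Dict.empty
      = pairs.foldl (fun dd q => dd.modify q.1 [] (fun l => l ++ [q.2])) PySem.Dict.empty := by
    rw [hpairs, List.foldl_flatMap]
    apply PySem.List.foldl_congr_mem
    intro dd comp hcm
    rw [PySem.List.foldl_if_eq_foldl_filter (fun (p : Int × Int) => p.2 == 1)
      (fun (dd : PySem.Dict Int (List String)) (p : Int × Int) => dd.modify p.1 [] (fun l => l ++ [comp]))]
    rw [hpc]
    rw [List.foldl_map]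
  rw [hdtn]
  -- keys of the flattened dict
  have hkeysD : (pairs.foldl (fun dd q => dd.modify q.1 [] (fun l => l ++ [q.2])) PySem.Dict.empty).keys
      = PySem.Set.ofList (pairs.map (fun q => q.1)) := by
    have h := PySem.Dict.keys_foldl_modify_key pairs (fun (q : Int × String) => q.1)
      ([] : List String) (fun _ q => fun l => l ++ [q.2]) PySem.Dict.empty
    beta_reduce at h
    rw [h, PySem.Dict.keys_empty, PySem.Set.update_nil_left]
  -- membership of the produced day keys
  have hmemP : ∀ x : Int, x ∈ pairs.map (fun q => q.1) ↔ ∃ j ∈ EDn, ((j:Nat):Int) = x := by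
    intro x
    rw [hpairs]
    constructor
    · intro hx
      obtain ⟨q, hq, rfl⟩ := List.mem_map.1 hx
      obtain ⟨c, hcm, hqc⟩ := List.mem_flatMap.1 hq
      rw [hpc] at hqc
      obtain ⟨p, hpm, rfl⟩ := List.mem_map.1 hqc
      have hp2 : (p.2 == 1) = true := (List.mem_filter.1 hpm).2
      have hpe := (List.mem_filter.1 hpm).1
      have hpe' := (mem_enum (g.getD c []) 0 p).1 (by simpa using hpe)
      obtain ⟨j, hjlt, hj1, hj2⟩ := hpe'
      have hck : c ∈ g.keys := hcomps_perm.mem_iff.1 hcm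
      have hjn : j < n := by rw [← hglen c hck]; exact hjlt
      refine ⟨j, ?_, by simpa using hj1.symm⟩
      rw [hEDn]
      refine List.mem_filter.2 ⟨List.mem_range.2 hjn, ?_⟩
      exact (any_values_iff g hnd _).2 ⟨c, hck, by
        have : (g.getD c []).getD j 0 = 1 := by rw [hj2]; simpa using hp2
        simpa using this⟩
    · rintro ⟨j, hj, rfl⟩
      have hc : g.values.any (fun v => v.getD j 0 == 1) = true := (List.mem_filter.1 hj).2
      obtain ⟨c, hck, hP⟩ := (any_values_iff g hnd _).1 hc
      have hjn : j < n := List.mem_range.1 (List.mem_filter.1 hj).1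
      apply List.mem_map.2
      refine ⟨(((j:Nat):Int), c), ?_, rfl⟩
      apply List.mem_flatMap.2
      refine ⟨c, hcomps_perm.mem_iff.2 hck, ?_⟩
      rw [hpc]
      apply List.mem_map.2
      refine ⟨(((j:Nat):Int), (g.getD c []).getD j 0), ?_, by
        have : (g.getD c []).getD j 0 = 1 := by simpa using hP
        rw [this]⟩
      apply List.mem_filter.2
      refine ⟨?_, by simpa using hP⟩
      have := (mem_enum (g.getD c []) 0 (((j:Nat):Int), (g.getD c []).getD j 0)).2
        ⟨j, by rw [hglen c hck]; exact hjn, by simp, rfl⟩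
      simpa using this
  have hsorted : PySem.List.sorted
      ((pairs.foldl (fun dd q => dd.modify q.1 [] (fun l => l ++ [q.2])) PySem.Dict.empty).keys)
      (fun x => x) false = EDn.map (fun (j:Nat) => ((j:Nat):Int)) := by
    apply PySem.List.sorted_eq_of_perm_of_pairwise_lt _ _ _ ?_ hEDn_lt
    rw [hkeysD]
    rw [List.perm_ext_iff_of_nodup hEDn_nd (PySem.Set.nodup_ofList _)]
    intro y
    rw [PySem.Set.mem_ofList, hmemP, List.mem_map]
  rw [hsorted]
  -- the names stored for an event day are exactly nm j
  have hgetd : ∀ j ∈ EDn,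
      (pairs.foldl (fun dd q => dd.modify q.1 [] (fun l => l ++ [q.2])) PySem.Dict.empty).getD
        ((j:Nat):Int) [] = nm j := by
    intro j hj
    have hjn : j < n := List.mem_range.1 (List.mem_filter.1 hj).1
    rw [PySem.Dict.getD_foldl_modify_append pairs PySem.Dict.empty (((j:Nat):Int)),
      PySem.Dict.getD_empty, List.nil_append]
    rw [hpairs, List.filter_flatMap, List.map_flatMap]
    have hcongr : ∀ c ∈ (PySem.List.sorted g.keys (fun x => x) false),
        ((pc c).filter (fun p => p.1 == ((j:Nat):Int))).map (fun x => x.2)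
        = if (g.getD c []).getD j 0 == 1 then [c] else [] := by
      intro c hcm
      have hck : c ∈ g.keys := hcomps_perm.mem_iff.1 hcm
      rw [hpc]
      rw [List.filter_map, List.filter_filter, List.map_map]
      simp only [Function.comp_apply]
      rw [enum_filter_day0 (g.getD c []) j]
      by_cases hcv : (g.getD c []).getD j 0 = 1
      · rw [if_pos ⟨by rw [hglen c hck]; exact hjn, hcv⟩, if_pos (by simpa using hcv)]
        rfl
      · rw [if_neg (by rintro ⟨-, hh⟩; exact hcv hh), if_neg (by simpa using hcv)]
        rfl
    rw [List.flatMap_congr hcongr, flatMap_singleton_filter]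
  rw [hL]
  by_cases hED : EDn = []
  · rw [hED]
    simp
  · have hmapA : EDn.map (fun (j:Nat) => (((j:Nat):Int), nm j)) ≠ [] := by
      simpa [List.map_eq_nil_iff] using hED
    have hmapB : EDn.map (fun (j:Nat) => ((j:Nat):Int)) ≠ [] := by
      simpa [List.map_eq_nil_iff] using hED
    rw [if_neg hmapA, if_neg hmapB]
    have hlastA1 : (PySem.List.pyGetD (EDn.map (fun (j:Nat) => (((j:Nat):Int), nm j))) (-1)
        ((0:Int), ([]:List String))).1 = ((EDn.getLast hED : Nat):Int) := by
      rw [PySem.List.pyGetD_neg_one _ _ hmapA, List.getLast_map]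
    have hlastB : PySem.List.pyGetD (EDn.map (fun (j:Nat) => ((j:Nat):Int))) (-1) (0:Int)
        = ((EDn.getLast hED : Nat):Int) := by
      rw [PySem.List.pyGetD_neg_one _ _ hmapB, List.getLast_map]
    rw [hlastA1, hlastB]
    set S : Int := ((n:Nat):Int) - ((EDn.getLast hED : Nat):Int) with hS
    rw [a_fold_shape nm S EDn EDn]
    rw [b_fold_shape nm S
      (fun day => (pairs.foldl (fun dd q => dd.modify q.1 [] (fun l => l ++ [q.2])) PySem.Dict.empty).getD day [])
      EDn hgetd]
    obtain ⟨h1, h2⟩ := loop_eq S nm EDn hcED EDn 0 (by simp) [] PySem.Set.empty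
    rw [show (decide ((0:Nat) ≠ 0)) = false from rfl,
      show (((0:Nat)):Int) = (0:Int) from rfl,
      show (if (0:Nat) = 0 then (none : Option Int) else some ((EDn.getD ((0:Nat)-1) 0 : Nat):Int)) = none from rfl] at h1 h2
    rw [h1, h2]

def GOODgrp (q : Int × PySem.Dict String (List Int)) : Prop :=
  q.2.keys.Nodup ∧ q.2.items ≠ [] ∧ ∀ p ∈ q.2.items, PySem.List.len p.2 = q.1

lemma groups_inv (l : List (String × List Int)) :
    ∀ d : PySem.Dict Int (PySem.Dict String (List Int)),
      d.keys.Nodup → (∀ q ∈ d.items, GOODgrp q) →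
      ((l.foldl (fun g p => g.modify (PySem.List.len p.2) PySem.Dict.empty
          (fun sub => sub.insert p.1 p.2)) d).keys.Nodup ∧
       ∀ q ∈ (l.foldl (fun g p => g.modify (PySem.List.len p.2) PySem.Dict.empty
          (fun sub => sub.insert p.1 p.2)) d).items, GOODgrp q) := by
  induction l with
  | nil => intro d hnd hg; exact ⟨hnd, hg⟩
  | cons p t ih =>
    intro d hnd hg
    rw [List.foldl_cons]
    have hmod : d.modify (PySem.List.len p.2) PySem.Dict.empty (fun sub => sub.insert p.1 p.2)
        = d.insert (PySem.List.len p.2) ((d.getD (PySem.List.len p.2) PySem.Dict.empty).insert p.1 p.2) := rfl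
    rw [hmod]
    apply ih
    · exact PySem.Dict.nodup_keys_insert _ _ _ hnd
    · intro q hq
      rcases (PySem.Dict.mem_items_insert _ _ _ q).1 hq with hq1 | hq2
      · subst hq1
        have hsub : GOODgrp (PySem.List.len p.2, d.getD (PySem.List.len p.2) PySem.Dict.empty) ∨
            d.getD (PySem.List.len p.2) PySem.Dict.empty = PySem.Dict.empty := by
          by_cases hc : d.contains (PySem.List.len p.2) = true
          · left
            have hk : PySem.List.len p.2 ∈ d.keys := (PySem.Dict.contains_iff_mem_keys _ _).1 hc
            have hk' : PySem.List.len p.2 ∈ d.items.map (·.1) := hk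
            obtain ⟨q0, hq0, hfst⟩ := List.mem_map.1 hk'
            have hgd : d.getD (PySem.List.len p.2) PySem.Dict.empty = q0.2 := by
              rw [← hfst]
              exact PySem.Dict.getD_of_mem_items d (by simpa using hq0) hnd _
            rw [hgd]
            have := hg q0 hq0
            rw [← hfst]
            exact ⟨this.1, this.2.1, fun r hr => this.2.2 r hr⟩
          · right
            exact PySem.Dict.getD_of_not_contains d _ (by simpa using hc)
        rcases hsub with hG | hE
        · refine ⟨PySem.Dict.nodup_keys_insert _ _ _ hG.1,
            List.ne_nil_of_mem (PySem.Dict.mem_items_insert_self _ _ _), ?_⟩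
          intro r hr
          rcases (PySem.Dict.mem_items_insert _ _ _ r).1 hr with hr1 | hr2
          · subst hr1; rfl
          · exact hG.2.2 r hr2.1
        · rw [hE]
          refine ⟨?_, List.ne_nil_of_mem (PySem.Dict.mem_items_insert_self _ _ _), ?_⟩
          · exact PySem.Dict.nodup_keys_insert _ _ _ (by simp [PySem.Dict.keys_empty])
          · intro r hr
            rcases (PySem.Dict.mem_items_insert _ _ _ r).1 hr with hr1 | hr2
            · subst hr1; rfl
            · simp [PySem.Dict.items] at hr2
              exact absurd hr2.1 (by simp [PySem.Dict.empty])
      · exact hg q hq2.1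

theorem wrapper_eq (event_string : List (String × List Int)) :
    collapse_event_matrix_wrapper event_string = collapse_event_matrix_wrapper_alt event_string := by
  simp only [collapse_event_matrix_wrapper, collapse_event_matrix_wrapper_alt]
  by_cases hC : (((PySem.Dict.ofList event_string).items.filter (fun p => p.2.any (fun v => v != 0))) : List (String × List Int)) = []
  · rw [if_pos hC, if_pos hC]
  · rw [if_neg hC, if_neg hC]
    have hinv := groups_inv
      ((PySem.Dict.ofList event_string).items.filter (fun p => p.2.any (fun v => v != 0)))
      PySem.Dict.empty (by simp [PySem.Dict.keys_empty])
      (by intro q hq; simp [PySem.Dict.items, PySem.Dict.empty] at hq)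
    have hfold :
        List.foldl (fun (st : List String × PySem.Dict String Int) e =>
            (st.1 ++ [cemA e.2], st.2.insert ("len_" ++ PySem.Int.toStr e.1) ((e.2.size : Int))))
          ([], PySem.Dict.empty)
          ((List.foldl (fun g p => g.modify (PySem.List.len p.2) PySem.Dict.empty
              (fun sub => sub.insert p.1 p.2)) PySem.Dict.empty
            ((PySem.Dict.ofList event_string).items.filter (fun p => p.2.any (fun v => v != 0)))).items)
        = List.foldl (fun (st : List String × PySem.Dict String Int) e =>
            (st.1 ++ [cemB e.2 e.1], st.2.insert ("len_" ++ PySem.Int.toStr e.1) ((e.2.size : Int))))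
          ([], PySem.Dict.empty)
          ((List.foldl (fun g p => g.modify (PySem.List.len p.2) PySem.Dict.empty
              (fun sub => sub.insert p.1 p.2)) PySem.Dict.empty
            ((PySem.Dict.ofList event_string).items.filter (fun p => p.2.any (fun v => v != 0)))).items) := by
      apply PySem.List.foldl_congr_mem
      intro acc e he
      have hG := hinv.2 e he
      rw [cem_eq e.2 e.1 hG.1 hG.2.1 hG.2.2]
    rw [hfold]

-- ===== VERDICT (by name: the statement is the Claim_ definition above) =====
theorem collapse_event_matrix_wrapper_spec : Claim_equal_collapse_event_matrix_wrapper := by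
  intro event_string _hdom
  unfold Spec_collapse_event_matrix_wrapper
  exact wrapper_eq event_string
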